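-- pv_equiv track=rewrite | github.com/DevFrog92/sparta_algorithm | week_1/04_plus_or_multiply.py | plus_or_multiply
-- ===== SOURCE A (Python) =====
-- def plus_or_multiply(array):
--     start = array[0]
--     for index in range(1,len(array)): # array의 길이인 N번 연산된다
--         if start <= 0 or array[index] <=1: # 비교연산 1회 진행
--             # 함정에 대해서 다시 한번 생각해 보자
--             start += array[index] # 뎟셈 연산 진행
--         else:
--             start *= array[index]
--     return start
-- ===== SOURCE B (Python) =====
-- def plus_or_multiply(array):
--     acc = array[0]
--     n = len(array)
--     i = 1
--     while i < n:
--         x = array[i]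
--         if x <= 1:
--             acc += x
--             i += 1
--         else:
--             # maximal run of elements > 1: array[i:j]
--             j = i + 1
--             while j < n and array[j] > 1:
--                 j += 1
--             # while non-positive, the rule adds even inside the run
--             k = i
--             while k < j and acc <= 0:
--                 acc += array[k]
--                 k += 1
--             # once positive it stays positive (all run elements > 1): multiply by the rest of the run's product
--             p = 1
--             for t in range(k, j):
--                 p *= array[t]
--             acc *= p
--             i = j
--     return acc
-- ===== Notes on version B (the rewrite author's own statement) =====
-- stated objective: alternative
-- what changed: Instead of deciding add-vs-multiply once per element, B segments the tail into maximal runs of elements > 1: elements <= 1 are added one by one, and inside a run it adds only while the accumulator is non-positive and then multiplies by the product of the remaining run in one go (correct because a positive accumulator times elements > 1 stays positive).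
import Mathlib
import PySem

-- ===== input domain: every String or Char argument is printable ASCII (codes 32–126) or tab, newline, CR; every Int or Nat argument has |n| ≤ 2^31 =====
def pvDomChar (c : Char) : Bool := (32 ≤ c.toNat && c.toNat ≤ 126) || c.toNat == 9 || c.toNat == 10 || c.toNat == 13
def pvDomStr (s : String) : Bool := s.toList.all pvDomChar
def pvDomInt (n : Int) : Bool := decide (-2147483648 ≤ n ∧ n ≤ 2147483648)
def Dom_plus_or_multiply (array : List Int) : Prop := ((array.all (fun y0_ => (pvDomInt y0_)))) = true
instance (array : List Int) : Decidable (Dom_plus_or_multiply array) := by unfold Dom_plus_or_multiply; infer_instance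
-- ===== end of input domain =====

-- B segments the tail into maximal runs of elements > 1 and multiplies each run's remainder by its product in one go, instead of A's per-element add/multiply decision; alternative algorithm, same cost.

-- ===== PORT A =====
-- start = array[0]; for index in range(1, len(array)): …  (indexing via pyGetD, safe under Pre_)
def plus_or_multiply (array : List Int) : Int :=
  let start := PySem.List.pyGetD array 0 0
  (PySem.List.pyRange 1 (PySem.List.len array) 1).foldl
    (fun start index =>
      if start ≤ 0 ∨ PySem.List.pyGetD array index 0 ≤ 1 then
        start + PySem.List.pyGetD array index 0
      else
        start * PySem.List.pyGetD array index 0)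
    start

-- ===== PORT B =====
-- p = 1; for y in run[k:]: p *= y
def pvProd (l : List Int) : Int := l.foldl (fun p y => p * y) 1

-- k loop: add run elements while acc <= 0; returns (acc, remaining run)
def pvAddPhase (acc : Int) : List Int → Int × List Int
  | [] => (acc, [])
  | x :: xs => if acc ≤ 0 then pvAddPhase (acc + x) xs else (acc, x :: xs)

-- the outer while loop over rest (the j loop is the takeWhile/dropWhile split)
def pvOuter (acc : Int) : List Int → Int
  | [] => acc
  | x :: rest =>
    if x ≤ 1 then pvOuter (acc + x) rest
    else
      let run := x :: rest.takeWhile (fun y => decide (1 < y))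
      let p := pvAddPhase acc run
      pvOuter (p.1 * pvProd p.2) (rest.dropWhile (fun y => decide (1 < y)))
termination_by l => l.length
decreasing_by
  · simp
  · simpa using Nat.lt_succ_of_le (List.length_dropWhile_le _ _)

def plus_or_multiply_alt (array : List Int) : Int :=
  pvOuter (PySem.List.pyGetD array 0 0) (PySem.List.slice array (some 1) none)

-- ===== PRECONDITION & SPEC =====
-- A raises IndexError on the empty list (array[0]); excluded.
def Pre_plus_or_multiply (array : List Int) : Prop := array ≠ []
instance (array : List Int) : Decidable (Pre_plus_or_multiply array) := by unfold Pre_plus_or_multiply; infer_instance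
def pvWitness_plus_or_multiply : List Int := ([2, 3, 0, 5])

def Spec_plus_or_multiply (array : List Int) (out : Int) : Prop := out = plus_or_multiply_alt array
instance (array : List Int) (out : Int) : Decidable (Spec_plus_or_multiply array out) := by unfold Spec_plus_or_multiply; infer_instance

-- ===== CLAIM (what is proved, stated in full; the proofs are below) =====
def Claim_equal_plus_or_multiply : Prop := ∀ (array : List Int), Dom_plus_or_multiply array → Pre_plus_or_multiply array → Spec_plus_or_multiply array (plus_or_multiply array)

-- ===== LEMMAS AND PROOFS =====

-- A's per-step combining function
def pvF (acc x : Int) : Int := if acc ≤ 0 ∨ x ≤ 1 then acc + x else acc * x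

theorem pvProd_shift (l : List Int) : ∀ a : Int, l.foldl (fun p y => p * y) a = a * pvProd l := by
  induction l with
  | nil => intro a; simp [pvProd]
  | cons x xs ih =>
      intro a
      simp only [pvProd, List.foldl_cons, ih (a * x), ih (1 * x)]
      ring

theorem pvProd_cons (x : Int) (xs : List Int) : pvProd (x :: xs) = x * pvProd xs := by
  show (x :: xs).foldl (fun p y => p * y) 1 = _
  rw [List.foldl_cons, pvProd_shift]; ring

theorem pvMulPhase (xs : List Int) : ∀ acc : Int, 0 < acc → (∀ y ∈ xs, 1 < y) →
    xs.foldl pvF acc = acc * pvProd xs := by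
  induction xs with
  | nil => intro acc _ _; simp [pvProd]
  | cons x xs ih =>
      intro acc hacc hall
      have hx : 1 < x := hall x (by simp)
      have hstep : pvF acc x = acc * x := by
        simp [pvF]; omega
      have hpos : 0 < acc * x := mul_pos hacc (by omega)
      simp only [List.foldl_cons, hstep, ih (acc * x) hpos (fun y hy => hall y (by simp [hy])),
        pvProd_cons]
      ring

theorem pvAddPhase_eq (run : List Int) : ∀ acc : Int, (∀ y ∈ run, 1 < y) →
    run.foldl pvF acc = (pvAddPhase acc run).1 * pvProd (pvAddPhase acc run).2 := by
  induction run with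
  | nil => intro acc _; simp [pvAddPhase, pvProd]
  | cons x xs ih =>
      intro acc hall
      by_cases h : acc ≤ 0
      · have hstep : pvF acc x = acc + x := by simp [pvF, h]
        simp only [List.foldl_cons, hstep, pvAddPhase, if_pos h]
        exact ih (acc + x) (fun y hy => hall y (by simp [hy]))
      · simp only [pvAddPhase, if_neg h]
        exact pvMulPhase (x :: xs) acc (by omega) hall

theorem pvMain (n : Nat) : ∀ l : List Int, l.length ≤ n → ∀ acc : Int,
    l.foldl pvF acc = pvOuter acc l := by
  induction n with
  | zero =>
      intro l hl acc
      have : l = [] := List.eq_nil_of_length_eq_zero (Nat.le_zero.mp hl)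
      simp [this, pvOuter]
  | succ n ih =>
      intro l hl acc
      cases l with
      | nil => simp [pvOuter]
      | cons x rest =>
          by_cases hx : x ≤ 1
          · have hstep : pvF acc x = acc + x := by simp [pvF, hx]
            rw [pvOuter, if_pos hx, List.foldl_cons, hstep]
            exact ih rest (by simpa using Nat.lt_succ_iff.mp (Nat.lt_of_lt_of_le (Nat.lt_succ_of_le (Nat.le_refl _)) hl)) (acc + x)
          · set p : Int → Bool := fun y => decide (1 < y) with hp
            have hsplit : rest = rest.takeWhile p ++ rest.dropWhile p :=
              (List.takeWhile_append_dropWhile).symm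
            rw [pvOuter, if_neg hx]
            have hrun : ∀ y ∈ x :: rest.takeWhile p, 1 < y := by
              intro y hy
              rcases List.mem_cons.mp hy with h | h
              · omega
              · have := List.mem_takeWhile_imp h
                simpa [hp] using this
            calc (x :: rest).foldl pvF acc
                = ((x :: rest.takeWhile p) ++ rest.dropWhile p).foldl pvF acc := by
                  conv_lhs => rw [hsplit]
                  rw [List.cons_append]
              _ = (rest.dropWhile p).foldl pvF ((x :: rest.takeWhile p).foldl pvF acc) := by
                  rw [List.foldl_append]
              _ = pvOuter ((pvAddPhase acc (x :: rest.takeWhile p)).1 *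
                    pvProd (pvAddPhase acc (x :: rest.takeWhile p)).2) (rest.dropWhile p) := by
                  rw [pvAddPhase_eq (x :: rest.takeWhile p) acc hrun]
                  exact ih (rest.dropWhile p)
                    (Nat.le_trans (List.length_dropWhile_le _ _) (Nat.lt_succ_iff.mp (by simpa using hl))) _

-- ===== VERDICT (by name: the statement is the Claim_ definition above) =====
theorem plus_or_multiply_spec : Claim_equal_plus_or_multiply := by
  intro array _ _
  unfold Spec_plus_or_multiply plus_or_multiply plus_or_multiply_alt
  rw [PySem.List.len_eq, PySem.List.foldl_pyRange_pyGetD' array 0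
    (fun acc x => if acc ≤ 0 ∨ x ≤ 1 then acc + x else acc * x) _ (by norm_num : (0:Int) ≤ 1)]
  rw [PySem.List.slice_from_one]
  simp only [Int.toNat_one, List.drop_one]
  exact pvMain array.tail.length array.tail (Nat.le_refl _) _
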